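-- pv_equiv track=rewrite | github.com/HamseMoismaila/de-learning-lab | student_grades.py | grade_distribution
-- ===== SOURCE A (Python) =====
-- def grade_distribution(students):
--     distribution = {"A": 0, "B": 0, "C": 0, "D": 0, "F": 0}
--
--     for score in students.values():
--         if score >= 80:
--             distribution["A"] += 1
--         elif score >= 70:
--             distribution["B"] += 1
--         elif score >= 60:
--             distribution["C"] += 1
--         elif score >= 50:
--             distribution["D"] += 1
--         else:
--             distribution["F"] += 1
--
--     return distribution
-- ===== SOURCE B (Python) =====
-- def grade_distribution(students):
--     boundaries = [50, 60, 70, 80]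
--     labels = ["F", "D", "C", "B", "A"]
--     distribution = {"A": 0, "B": 0, "C": 0, "D": 0, "F": 0}
--     for score in students.values():
--         # bisect_right(boundaries, score) by hand (A uses no imports)
--         lo, hi = 0, len(boundaries)
--         while lo < hi:
--             mid = (lo + hi) // 2
--             if score < boundaries[mid]:
--                 hi = mid
--             else:
--                 lo = mid + 1
--         distribution[labels[lo]] += 1
--     return distribution
-- ===== Notes on version B (the rewrite author's own statement) =====
-- stated objective: alternative
-- what changed: Replaces the five-way if/elif cascade with a sorted threshold table plus parallel grade labels, locating each score's bucket by a hand-written bisect_right binary search (A imports nothing, so bisect is not imported) and incrementing that label's count.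
import Mathlib
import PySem

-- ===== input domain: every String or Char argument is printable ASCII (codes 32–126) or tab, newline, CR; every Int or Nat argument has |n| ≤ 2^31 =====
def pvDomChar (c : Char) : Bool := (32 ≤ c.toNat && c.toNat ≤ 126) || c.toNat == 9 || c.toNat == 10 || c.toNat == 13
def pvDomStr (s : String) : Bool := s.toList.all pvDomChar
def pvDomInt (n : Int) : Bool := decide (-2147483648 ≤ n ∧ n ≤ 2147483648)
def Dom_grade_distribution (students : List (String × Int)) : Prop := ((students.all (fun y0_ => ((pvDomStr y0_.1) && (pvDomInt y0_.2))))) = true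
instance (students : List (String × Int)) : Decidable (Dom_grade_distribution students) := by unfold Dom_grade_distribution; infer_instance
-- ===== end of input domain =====

-- B replaces A's five-way if/elif cascade with a sorted threshold table and a
-- hand-written binary search (bisect_right) into it; alternative structure, same cost.


-- ===== PORT A =====
def grade_distribution (students : List (String × Int)) : List (String × Int) :=
  let distribution : PySem.Dict String Int :=
    PySem.Dict.ofList [("A", 0), ("B", 0), ("C", 0), ("D", 0), ("F", 0)]
  let distribution :=
    (PySem.Dict.ofList students).values.foldl (fun d score =>
      if score ≥ 80 then d.modify "A" 0 (· + 1)
      else if score ≥ 70 then d.modify "B" 0 (· + 1)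
      else if score ≥ 60 then d.modify "C" 0 (· + 1)
      else if score ≥ 50 then d.modify "D" 0 (· + 1)
      else d.modify "F" 0 (· + 1)) distribution
  distribution.items

-- ===== PORT B =====
-- the hand-written bisect_right while-loop of Source B (lo, hi are the loop state)
def pvBsearch (boundaries : List Int) (score : Int) (lo hi : Nat) : Nat :=
  if lo < hi then
    let mid := (lo + hi) / 2
    if score < PySem.List.pyGetD boundaries (Int.ofNat mid) 0 then
      pvBsearch boundaries score lo mid
    else
      pvBsearch boundaries score (mid + 1) hi
  else lo
termination_by hi - lo
decreasing_by all_goals omega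

def grade_distribution_alt (students : List (String × Int)) : List (String × Int) :=
  let boundaries : List Int := [50, 60, 70, 80]
  let labels : List String := ["F", "D", "C", "B", "A"]
  let distribution : PySem.Dict String Int :=
    PySem.Dict.ofList [("A", 0), ("B", 0), ("C", 0), ("D", 0), ("F", 0)]
  let distribution :=
    (PySem.Dict.ofList students).values.foldl (fun d score =>
      d.modify (PySem.List.pyGetD labels
        (Int.ofNat (pvBsearch boundaries score 0 boundaries.length)) "") 0 (· + 1)) distribution
  distribution.items

-- ===== PRECONDITION & SPEC =====
def Spec_grade_distribution (students : List (String × Int)) (out : List (String × Int)) : Prop := out = grade_distribution_alt students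
instance (students : List (String × Int)) (out : List (String × Int)) : Decidable (Spec_grade_distribution students out) := by unfold Spec_grade_distribution; infer_instance

-- ===== CLAIM (what is proved, stated in full; the proofs are below) =====
def Claim_equal_grade_distribution : Prop := ∀ (students : List (String × Int)), Dom_grade_distribution students → Spec_grade_distribution students (grade_distribution students)

-- ===== LEMMAS AND PROOFS =====
-- the binary search lands in the same bucket as the cascade
lemma pvBsearch_val (score : Int) :
    pvBsearch [50, 60, 70, 80] score 0 4 =
    (if score ≥ 80 then 4 else if score ≥ 70 then 3 else if score ≥ 60 then 2
     else if score ≥ 50 then 1 else 0) := by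
  by_cases h80 : score ≥ 80
  · rw [pvBsearch.eq_def]
    norm_num [PySem.List.pyGetD, PySem.List.pyGet?, PySem.List.pyIdx?]
    rw [if_neg (by first | omega | (simp; omega)), pvBsearch.eq_def]
    norm_num [PySem.List.pyGetD, PySem.List.pyGet?, PySem.List.pyIdx?]
    rw [if_neg (by first | omega | (simp; omega)), pvBsearch.eq_def]
    simp [h80]
  · by_cases h70 : score ≥ 70
    · rw [pvBsearch.eq_def]
      norm_num [PySem.List.pyGetD, PySem.List.pyGet?, PySem.List.pyIdx?]
      rw [if_neg (by first | omega | (simp; omega)), pvBsearch.eq_def]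
      norm_num [PySem.List.pyGetD, PySem.List.pyGet?, PySem.List.pyIdx?]
      rw [if_pos (by first | omega | (simp; omega)), pvBsearch.eq_def]
      simp [h80, h70]
    · by_cases h60 : score ≥ 60
      · rw [pvBsearch.eq_def]
        norm_num [PySem.List.pyGetD, PySem.List.pyGet?, PySem.List.pyIdx?]
        rw [if_pos (by first | omega | (simp; omega)), pvBsearch.eq_def]
        norm_num [PySem.List.pyGetD, PySem.List.pyGet?, PySem.List.pyIdx?]
        rw [if_neg (by first | omega | (simp; omega)), pvBsearch.eq_def]
        simp [h80, h70, h60]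
      · by_cases h50 : score ≥ 50
        · rw [pvBsearch.eq_def]
          norm_num [PySem.List.pyGetD, PySem.List.pyGet?, PySem.List.pyIdx?]
          rw [if_pos (by first | omega | (simp; omega)), pvBsearch.eq_def]
          norm_num [PySem.List.pyGetD, PySem.List.pyGet?, PySem.List.pyIdx?]
          rw [if_pos (by first | omega | (simp; omega)), pvBsearch.eq_def]
          norm_num [PySem.List.pyGetD, PySem.List.pyGet?, PySem.List.pyIdx?]
          rw [if_neg (by first | omega | (simp; omega)), pvBsearch.eq_def]
          simp [h80, h70, h60, h50]
        · rw [pvBsearch.eq_def]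
          norm_num [PySem.List.pyGetD, PySem.List.pyGet?, PySem.List.pyIdx?]
          rw [if_pos (by first | omega | (simp; omega)), pvBsearch.eq_def]
          norm_num [PySem.List.pyGetD, PySem.List.pyGet?, PySem.List.pyIdx?]
          rw [if_pos (by first | omega | (simp; omega)), pvBsearch.eq_def]
          norm_num [PySem.List.pyGetD, PySem.List.pyGet?, PySem.List.pyIdx?]
          rw [if_pos (by first | omega | (simp; omega)), pvBsearch.eq_def]
          simp [h80, h70, h60, h50]

-- hence the two per-score update steps are the same function
lemma pvStep_eq :
    (fun (d : PySem.Dict String Int) (score : Int) =>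
      d.modify (PySem.List.pyGetD ["F", "D", "C", "B", "A"]
        (Int.ofNat (pvBsearch [50, 60, 70, 80] score 0 ([50, 60, 70, 80] : List Int).length)) "")
        0 (· + 1)) =
    (fun (d : PySem.Dict String Int) (score : Int) =>
      if score ≥ 80 then d.modify "A" 0 (· + 1)
      else if score ≥ 70 then d.modify "B" 0 (· + 1)
      else if score ≥ 60 then d.modify "C" 0 (· + 1)
      else if score ≥ 50 then d.modify "D" 0 (· + 1)
      else d.modify "F" 0 (· + 1)) := by
  funext d score
  have hv := pvBsearch_val score
  norm_num [List.length]
  rw [hv]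
  split_ifs <;> rfl

-- ===== VERDICT (by name: the statement is the Claim_ definition above) =====
theorem grade_distribution_spec : Claim_equal_grade_distribution := by
  intro students _
  unfold Spec_grade_distribution grade_distribution grade_distribution_alt
  simp only []
  rw [pvStep_eq]
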